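-- pv_equiv track=rewrite | github.com/nhannt201/100AlgorithmsChallenge_PyThon | 16.arrayConversion.py | arrLe
-- ===== SOURCE A (Python) =====
-- def arrLe(arr):
--     new_arr = []
--     for x in range(len(arr)-1):
--         if x % 2 == 0:
--             new_arr.append(arr[x] + arr[x+1])
--         else:
--             continue
--     if len(new_arr) > 1:
--         return  arrChan(new_arr)
--     else:
--         return new_arr
--
-- def arrChan(arr):
--     arr_rs = []
--     for y in range(len(arr)-1):
--         if y % 2 == 0:
--            arr_rs.append(arr[y] * arr[y+1])
--     return arr_rs
-- ===== SOURCE B (Python) =====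
-- def arrLe(arr):
--     n = len(arr)
--     if n < 2:
--         return []
--     if n < 4:
--         return [arr[0] + arr[1]]
--     out = []
--     for i in range(0, n - 3, 4):
--         out.append((arr[i] + arr[i + 1]) * (arr[i + 2] + arr[i + 3]))
--     return out
-- ===== Notes on version B (the rewrite author's own statement) =====
-- stated objective: simpler
-- what changed: Replaces A's two passes (build the adjacent-sums list, then multiply its adjacent pairs) with one direct pass over groups of four consecutive elements, never materialising the intermediate sums list; short inputs are handled by an up-front guard.
import Mathlib
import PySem

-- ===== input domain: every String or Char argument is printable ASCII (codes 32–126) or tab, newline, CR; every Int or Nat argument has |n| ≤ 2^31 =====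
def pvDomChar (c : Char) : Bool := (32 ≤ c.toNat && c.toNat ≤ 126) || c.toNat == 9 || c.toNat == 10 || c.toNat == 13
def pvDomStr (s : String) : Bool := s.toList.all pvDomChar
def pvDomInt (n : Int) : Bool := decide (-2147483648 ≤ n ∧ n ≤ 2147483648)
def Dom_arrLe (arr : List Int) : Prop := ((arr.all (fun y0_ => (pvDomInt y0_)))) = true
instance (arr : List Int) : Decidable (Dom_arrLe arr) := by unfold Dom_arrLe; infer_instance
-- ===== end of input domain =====

-- B collapses A's two passes (adjacent sums, then adjacent products of the sums) into one
-- pass over quadruples of consecutive elements; objective: simpler (no intermediate list).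

-- ===== PORT A =====
-- helper arrChan of A, transliterated
def arrChanP (arr : List Int) : List Int :=
  (PySem.List.pyRange 0 ((arr.length : Int) - 1) 1).foldl
    (fun acc y =>
      if y % 2 == 0 then
        acc ++ [PySem.List.pyGetD arr y 0 * PySem.List.pyGetD arr (y + 1) 0]
      else acc) []

def arrLe (arr : List Int) : List Int :=
  let new_arr :=
    (PySem.List.pyRange 0 ((arr.length : Int) - 1) 1).foldl
      (fun acc x =>
        if x % 2 == 0 then
          acc ++ [PySem.List.pyGetD arr x 0 + PySem.List.pyGetD arr (x + 1) 0]
        else acc) []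
  if new_arr.length > 1 then arrChanP new_arr else new_arr

-- ===== PORT B =====
def arrLe_alt (arr : List Int) : List Int :=
  if arr.length < 2 then []
  else if arr.length < 4 then [PySem.List.pyGetD arr 0 0 + PySem.List.pyGetD arr 1 0]
  else
    (PySem.List.pyRange 0 ((arr.length : Int) - 3) 4).foldl
      (fun acc i =>
        acc ++ [(PySem.List.pyGetD arr i 0 + PySem.List.pyGetD arr (i + 1) 0) *
                (PySem.List.pyGetD arr (i + 2) 0 + PySem.List.pyGetD arr (i + 3) 0)]) []

-- ===== PRECONDITION & SPEC =====
def Spec_arrLe (arr : List Int) (out : List Int) : Prop := out = arrLe_alt arr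
instance (arr : List Int) (out : List Int) : Decidable (Spec_arrLe arr out) := by unfold Spec_arrLe; infer_instance

-- ===== CLAIM (what is proved, stated in full; the proofs are below) =====
def Claim_equal_arrLe : Prop := ∀ (arr : List Int), Dom_arrLe arr → Spec_arrLe arr (arrLe arr)

-- ===== LEMMAS AND PROOFS =====

-- the even numbers below m, as a compressed range
lemma filter_even_range (m : Nat) :
    (List.range m).filter (fun k => k % 2 == 0) =
      (List.range ((m + 1) / 2)).map (fun k => 2 * k) := by
  induction m with
  | zero => simp
  | succ m ih =>
    rw [List.range_succ, List.filter_append, ih]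
    by_cases h : m % 2 = 0
    · have h2 : (m + 1 + 1) / 2 = (m + 1) / 2 + 1 := by omega
      have h3 : 2 * ((m + 1) / 2) = m := by omega
      rw [h2, List.range_succ, List.map_append]
      simp [h, h3]
    · have h2 : (m + 1 + 1) / 2 = (m + 1) / 2 := by omega
      simp [h, h2]

-- the shared loop shape of A's two passes, as a map over a Nat range
lemma loopPairs (arr : List Int) (op : Int → Int → Int) :
    ((PySem.List.pyRange 0 ((arr.length : Int) - 1) 1).foldl
      (fun acc x =>
        if x % 2 == 0 then
          acc ++ [op (PySem.List.pyGetD arr x 0) (PySem.List.pyGetD arr (x + 1) 0)]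
        else acc) [])
    = (List.range (arr.length / 2)).map
        (fun (k : Nat) => op (PySem.List.pyGetD arr (2 * (k : Int)) 0)
                     (PySem.List.pyGetD arr (2 * (k : Int) + 1) 0)) := by
  rw [PySem.List.foldl_append_if]
  rcases Nat.eq_zero_or_pos arr.length with h | h
  · rw [h]
    rw [show ((0 : Nat) : Int) - 1 = -1 by norm_num, PySem.List.pyRange_one_eq_nil (by norm_num)]
    simp
  · have hb : ((arr.length : Int) - 1) = ((arr.length - 1 : Nat) : Int) := by omega
    rw [hb, PySem.List.pyRange_zero_natCast, List.filter_map, List.map_map]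
    have hp : ((fun x : Int => x % 2 == 0) ∘ fun k : Nat => (k : Int)) =
        (fun k : Nat => k % 2 == 0) := by
      funext k
      simp [Function.comp]
      omega
    rw [hp, filter_even_range, List.map_map, List.nil_append]
    have hc : (arr.length - 1 + 1) / 2 = arr.length / 2 := by omega
    rw [hc]
    apply List.map_congr_left
    intro k _
    simp [Function.comp]

-- B's loop as a map over a Nat range (only used when 4 ≤ length)
lemma loopQuads (arr : List Int) (h : 4 ≤ arr.length) :
    ((PySem.List.pyRange 0 ((arr.length : Int) - 3) 4).foldl
      (fun acc i =>
        acc ++ [(PySem.List.pyGetD arr i 0 + PySem.List.pyGetD arr (i + 1) 0) *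
                (PySem.List.pyGetD arr (i + 2) 0 + PySem.List.pyGetD arr (i + 3) 0)]) [])
    = (List.range (arr.length / 4)).map
        (fun (k : Nat) => (PySem.List.pyGetD arr (4 * (k : Int)) 0 + PySem.List.pyGetD arr (4 * (k : Int) + 1) 0) *
                  (PySem.List.pyGetD arr (4 * (k : Int) + 2) 0 + PySem.List.pyGetD arr (4 * (k : Int) + 3) 0)) := by
  rw [PySem.List.foldl_append_singleton_eq_map, List.nil_append,
      PySem.List.pyRange_of_pos 0 ((arr.length : Int) - 3) (by norm_num)]
  have hlt : (0 : Int) < (arr.length : Int) - 3 := by omega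
  rw [if_pos hlt]
  have hc : (((arr.length : Int) - 3 - 0 + 4 - 1) / 4).toNat = arr.length / 4 := by omega
  rw [hc, List.map_map]
  apply List.map_congr_left
  intro k _
  simp [Function.comp]

-- index into the sums list (a map over a Nat range) at an in-range Int index
lemma getD_sums (f : Nat → Int) (m : Nat) (j : Nat) (hj : j < m) :
    PySem.List.pyGetD ((List.range m).map f) ((j : Int)) 0 = f j := by
  rw [PySem.List.pyGetD_eq_getElem _ _ (by positivity) (by simpa using hj)]
  simp

-- ===== VERDICT (by name: the statement is the Claim_ definition above) =====
theorem arrLe_spec : Claim_equal_arrLe := by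
  intro arr _
  unfold Spec_arrLe arrLe arrLe_alt
  rw [loopPairs arr (· + ·)]
  set n := arr.length with hn
  by_cases h4 : 4 ≤ n
  · have hlen : ((List.range (n / 2)).map
        (fun (k : Nat) => PySem.List.pyGetD arr (2 * (k : Int)) 0 + PySem.List.pyGetD arr (2 * (k : Int) + 1) 0)).length
        = n / 2 := by simp
    rw [if_pos (by rw [hlen]; omega), if_neg (by omega), if_neg (by omega)]
    unfold arrChanP
    rw [hlen]
    have := loopPairs ((List.range (n / 2)).map
        (fun (k : Nat) => PySem.List.pyGetD arr (2 * (k : Int)) 0 + PySem.List.pyGetD arr (2 * (k : Int) + 1) 0)) (· * ·)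
    rw [hlen] at this
    rw [this, loopQuads arr h4]
    have hc : n / 2 / 2 = n / 4 := by omega
    rw [hc]
    apply List.map_congr_left
    intro k hk
    rw [List.mem_range] at hk
    have h1 : ((2 * (k : Int))) = (((2 * k : Nat) : Int)) := by push_cast; ring
    have h2 : ((2 * (k : Int)) + 1) = (((2 * k + 1 : Nat) : Int)) := by push_cast; ring
    rw [h2, h1, getD_sums _ (n / 2) (2 * k) (by omega),
        getD_sums _ (n / 2) (2 * k + 1) (by omega)]
    have e1 : (2 * ((2 * k : Nat) : Int)) = 4 * (k : Int) := by push_cast; ring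
    have e2 : (2 * ((2 * k : Nat) : Int) + 1) = 4 * (k : Int) + 1 := by push_cast; ring
    have e3 : (2 * ((2 * k + 1 : Nat) : Int)) = 4 * (k : Int) + 2 := by push_cast; ring
    have e4 : (2 * ((2 * k + 1 : Nat) : Int) + 1) = 4 * (k : Int) + 3 := by push_cast; ring
    rw [e2, e4, e1, e3]
  · -- short inputs: the sums list has at most one element
    have hlen : ((List.range (n / 2)).map
        (fun (k : Nat) => PySem.List.pyGetD arr (2 * (k : Int)) 0 + PySem.List.pyGetD arr (2 * (k : Int) + 1) 0)).length
        = n / 2 := by simp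
    rw [if_neg (by rw [hlen]; omega)]
    by_cases h2 : n < 2
    · rw [if_pos h2]
      have : n / 2 = 0 := by omega
      rw [this]
      simp
    · rw [if_neg h2, if_pos (by omega)]
      have : n / 2 = 1 := by omega
      rw [this]
      simp
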